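-- pv_equiv track=rewrite | github.com/omarsaqr12/git | app/main.py | extract_chars_until_number
-- ===== SOURCE A (Python) =====
-- def extract_chars_until_number(byte_obj):
--     # This will hold the collected bytes in reverse order
--     collected_bytes = []
--
--     # Iterate from the end of the byte object
--     for byte in reversed(byte_obj):
--         if 48 <= byte <= 57:  # ASCII values for '0' to '9'
--             break
--         collected_bytes.append(byte)
--
--     # Reverse the collected bytes to restore original order
--     collected_bytes.reverse()
--
--     # Decode the collected bytes to a string using a fallback encoding
--     try:
--         result = bytes(collected_bytes).decode('utf-8', errors='ignore')
--     except UnicodeDecodeError: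
--         result = bytes(collected_bytes).decode('iso-8859-1', errors='ignore')
--
--     return result
-- ===== SOURCE B (Python) =====
-- def extract_chars_until_number(byte_obj):
--     # Forward pass: remember the index of the last digit byte, then decode the tail slice.
--     last_digit_idx = -1
--     for i, b in enumerate(byte_obj):
--         if 48 <= b <= 57:
--             last_digit_idx = i
--     return bytes(byte_obj[last_digit_idx + 1:]).decode('utf-8', errors='ignore')
-- ===== Notes on version B (the rewrite author's own statement) =====
-- stated objective: simpler
-- what changed: Replaces the backward collect/break/reverse loop with a single forward pass that tracks the index of the last digit byte and then decodes one tail slice of the input; the dead try/except is dropped (errors='ignore' never raises UnicodeDecodeError).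
import Mathlib
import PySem

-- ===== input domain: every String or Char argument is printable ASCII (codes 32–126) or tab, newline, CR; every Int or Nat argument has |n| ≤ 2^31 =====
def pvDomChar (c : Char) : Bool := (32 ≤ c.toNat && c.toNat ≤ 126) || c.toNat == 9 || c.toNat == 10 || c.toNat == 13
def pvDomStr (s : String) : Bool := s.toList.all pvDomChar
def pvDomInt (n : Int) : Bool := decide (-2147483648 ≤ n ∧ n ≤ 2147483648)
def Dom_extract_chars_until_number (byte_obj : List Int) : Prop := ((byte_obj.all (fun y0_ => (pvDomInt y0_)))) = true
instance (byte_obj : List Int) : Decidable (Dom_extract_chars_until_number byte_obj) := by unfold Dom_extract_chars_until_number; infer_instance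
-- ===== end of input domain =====

-- B replaces A's backward collect/break/reverse loop by one forward pass tracking the
-- index of the last digit byte plus a single tail slice; objective: simpler.

-- ===== PORT A =====
-- A's call bytes(...).decode('utf-8', errors='ignore'), ported as a direct recursive
-- UTF-8 decoder that skips the maximal invalid subpart (exact on byte lists with
-- entries in 0..255, which Pre_ guarantees for the decoded segment).
def pvUtf8Ignore : List Int → List Char
  | [] => []
  | b :: rest =>
    if b < 0x80 then Char.ofNat b.toNat :: pvUtf8Ignore rest
    else if 0xC2 ≤ b ∧ b ≤ 0xDF then
      match rest with
      | c1 :: rest1 =>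
        if 0x80 ≤ c1 ∧ c1 ≤ 0xBF then
          Char.ofNat ((b - 0xC0) * 64 + (c1 - 0x80)).toNat :: pvUtf8Ignore rest1
        else pvUtf8Ignore (c1 :: rest1)
      | [] => []
    else if 0xE0 ≤ b ∧ b ≤ 0xEF then
      match rest with
      | c1 :: rest1 =>
        if (if b = 0xE0 then (0xA0:Int) else 0x80) ≤ c1 ∧
           c1 ≤ (if b = 0xED then (0x9F:Int) else 0xBF) then
          match rest1 with
          | c2 :: rest2 =>
            if 0x80 ≤ c2 ∧ c2 ≤ 0xBF then
              Char.ofNat ((b - 0xE0) * 4096 + (c1 - 0x80) * 64 + (c2 - 0x80)).toNat ::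
                pvUtf8Ignore rest2
            else pvUtf8Ignore (c2 :: rest2)
          | [] => []
        else pvUtf8Ignore (c1 :: rest1)
      | [] => []
    else if 0xF0 ≤ b ∧ b ≤ 0xF4 then
      match rest with
      | c1 :: rest1 =>
        if (if b = 0xF0 then (0x90:Int) else 0x80) ≤ c1 ∧
           c1 ≤ (if b = 0xF4 then (0x8F:Int) else 0xBF) then
          match rest1 with
          | c2 :: rest2 =>
            if 0x80 ≤ c2 ∧ c2 ≤ 0xBF then
              match rest2 with
              | c3 :: rest3 =>
                if 0x80 ≤ c3 ∧ c3 ≤ 0xBF then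
                  Char.ofNat ((b - 0xF0) * 262144 + (c1 - 0x80) * 4096 +
                    (c2 - 0x80) * 64 + (c3 - 0x80)).toNat :: pvUtf8Ignore rest3
                else pvUtf8Ignore (c3 :: rest3)
              | [] => []
            else pvUtf8Ignore (c2 :: rest2)
          | [] => []
        else pvUtf8Ignore (c1 :: rest1)
      | [] => []
    else pvUtf8Ignore rest

-- the 'for byte in reversed(byte_obj): if digit: break; collected.append(byte)' loop
def pvLoopA : List Int → List Int → List Int
  | [], acc => acc
  | b :: rest, acc => if 48 ≤ b ∧ b ≤ 57 then acc else pvLoopA rest (acc ++ [b])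

def extract_chars_until_number (byte_obj : List Int) : String :=
  String.ofList (pvUtf8Ignore ((pvLoopA byte_obj.reverse []).reverse))

-- ===== PORT B =====
-- B's .decode('utf-8', errors='ignore') call, ported as a left fold with a state
-- machine: state = (emitted chars, pending incomplete multibyte prefix); an invalid
-- byte flushes the pending prefix and is re-dispatched as a fresh start
-- (exact on byte lists with entries in 0..255, as for A's decoder).
def pvUtf8Start (acc : List Char) (b : Int) : List Char × List Int :=
  if b < 0x80 then (acc ++ [Char.ofNat b.toNat], [])
  else if (0xC2 ≤ b ∧ b ≤ 0xDF) ∨ (0xE0 ≤ b ∧ b ≤ 0xEF) ∨ (0xF0 ≤ b ∧ b ≤ 0xF4) then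
    (acc, [b])
  else (acc, [])

def pvUtf8Step (s : List Char × List Int) (b : Int) : List Char × List Int :=
  match s with
  | (acc, []) => pvUtf8Start acc b
  | (acc, [b0]) =>
    if 0xC2 ≤ b0 ∧ b0 ≤ 0xDF then
      if 0x80 ≤ b ∧ b ≤ 0xBF then
        (acc ++ [Char.ofNat ((b0 - 0xC0) * 64 + (b - 0x80)).toNat], [])
      else pvUtf8Start acc b
    else if 0xE0 ≤ b0 ∧ b0 ≤ 0xEF then
      if (if b0 = 0xE0 then (0xA0:Int) else 0x80) ≤ b ∧
         b ≤ (if b0 = 0xED then (0x9F:Int) else 0xBF) then (acc, [b0, b])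
      else pvUtf8Start acc b
    else
      if (if b0 = 0xF0 then (0x90:Int) else 0x80) ≤ b ∧
         b ≤ (if b0 = 0xF4 then (0x8F:Int) else 0xBF) then (acc, [b0, b])
      else pvUtf8Start acc b
  | (acc, [b0, b1]) =>
    if 0xE0 ≤ b0 ∧ b0 ≤ 0xEF then
      if 0x80 ≤ b ∧ b ≤ 0xBF then
        (acc ++ [Char.ofNat ((b0 - 0xE0) * 4096 + (b1 - 0x80) * 64 + (b - 0x80)).toNat], [])
      else pvUtf8Start acc b
    else
      if 0x80 ≤ b ∧ b ≤ 0xBF then (acc, [b0, b1, b]) else pvUtf8Start acc b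
  | (acc, b0 :: b1 :: b2 :: _) =>
    if 0x80 ≤ b ∧ b ≤ 0xBF then
      (acc ++ [Char.ofNat ((b0 - 0xF0) * 262144 + (b1 - 0x80) * 4096 +
        (b2 - 0x80) * 64 + (b - 0x80)).toNat], [])
    else pvUtf8Start acc b

def pvUtf8Decode (l : List Int) : List Char := (l.foldl pvUtf8Step ([], [])).1

-- forward pass: last_digit_idx over enumerate(byte_obj), initialized to -1
def pvLastDigit (byte_obj : List Int) : Int :=
  (PySem.List.enumerate byte_obj 0).foldl
    (fun last p => if 48 ≤ p.2 ∧ p.2 ≤ 57 then p.1 else last) (-1)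

def extract_chars_until_number_alt (byte_obj : List Int) : String :=
  String.ofList (pvUtf8Decode
    (PySem.List.slice byte_obj (some (pvLastDigit byte_obj + 1)) none))

-- ===== PRECONDITION & SPEC =====
-- Pre_ excludes exactly the inputs where bytes(...) raises ValueError in both
-- programs: a byte outside 0..255 in the trailing digit-free segment.
def Pre_extract_chars_until_number (byte_obj : List Int) : Prop :=
  ((byte_obj.reverse.takeWhile (fun b => !decide (48 ≤ b ∧ b ≤ 57))).all
    (fun b => decide (0 ≤ b ∧ b ≤ 255))) = true
instance (byte_obj : List Int) : Decidable (Pre_extract_chars_until_number byte_obj) := by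
  unfold Pre_extract_chars_until_number; infer_instance

def pvWitness_extract_chars_until_number : List Int := [65, 49, 66, 67]

def Spec_extract_chars_until_number (byte_obj : List Int) (out : String) : Prop :=
  out = extract_chars_until_number_alt byte_obj
instance (byte_obj : List Int) (out : String) :
    Decidable (Spec_extract_chars_until_number byte_obj out) := by
  unfold Spec_extract_chars_until_number; infer_instance

-- ===== CLAIM (what is proved, stated in full; the proofs are below) =====
def Claim_equal_extract_chars_until_number : Prop :=
  ∀ (byte_obj : List Int), Dom_extract_chars_until_number byte_obj →
    Pre_extract_chars_until_number byte_obj →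
    Spec_extract_chars_until_number byte_obj (extract_chars_until_number byte_obj)

-- ===== LEMMAS AND PROOFS =====

-- A's break-loop is takeWhile of the non-digit predicate
theorem pvLoopA_eq (l acc : List Int) :
    pvLoopA l acc = acc ++ l.takeWhile (fun b => !decide (48 ≤ b ∧ b ≤ 57)) := by
  induction l generalizing acc with
  | nil => simp [pvLoopA]
  | cons b rest ih =>
      simp only [pvLoopA, List.takeWhile_cons]
      by_cases h : 48 ≤ b ∧ b ≤ 57
      · simp [h]
      · simp [h, ih]

-- bounds for the last-digit index
theorem pvLastDigit_bounds_aux (l : List Int) (s a : Int)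
    (h1 : -1 ≤ a) (h2 : a ≤ s - 1) :
    -1 ≤ (PySem.List.enumerate l s).foldl
        (fun last p => if 48 ≤ p.2 ∧ p.2 ≤ 57 then p.1 else last) a ∧
      (PySem.List.enumerate l s).foldl
        (fun last p => if 48 ≤ p.2 ∧ p.2 ≤ 57 then p.1 else last) a ≤ s + l.length - 1 := by
  induction l generalizing s a with
  | nil => simp [PySem.List.enumerate_nil]; omega
  | cons x xs ih =>
      rw [PySem.List.enumerate_cons]
      simp only [List.foldl_cons, List.length_cons]
      by_cases h : 48 ≤ x ∧ x ≤ 57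
      · simp only [h, and_self, if_pos]
        have := ih (s + 1) s (by omega) (by omega)
        constructor
        · exact this.1
        · omega
      · simp only [if_neg h]
        have := ih (s + 1) a (by omega) (by omega)
        constructor
        · exact this.1
        · omega

theorem pvLastDigit_bounds (l : List Int) :
    -1 ≤ pvLastDigit l ∧ pvLastDigit l ≤ (l.length : Int) - 1 := by
  have := pvLastDigit_bounds_aux l 0 (-1) (by omega) (by omega)
  unfold pvLastDigit
  omega

theorem pvLastDigit_append (l : List Int) (b : Int) :
    pvLastDigit (l ++ [b]) =
      if 48 ≤ b ∧ b ≤ 57 then (l.length : Int) else pvLastDigit l := by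
  unfold pvLastDigit
  rw [PySem.List.enumerate_append, List.foldl_append]
  simp [PySem.List.enumerate_cons, PySem.List.enumerate_nil]

-- B's tail slice equals A's reversed takeWhile of the reversed list
theorem slice_eq_takeWhile (l : List Int) :
    PySem.List.slice l (some (pvLastDigit l + 1)) none =
      (l.reverse.takeWhile (fun b => !decide (48 ≤ b ∧ b ≤ 57))).reverse := by
  induction l using List.reverseRecOn with
  | nil => simp [PySem.List.slice]
  | append_singleton l b ih =>
      have hb := pvLastDigit_bounds l
      rw [pvLastDigit_append]
      by_cases h : 48 ≤ b ∧ b ≤ 57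
      · rw [if_pos h,
          PySem.List.slice_from _ (by omega)]
        have hlen : ((l.length : Int) + 1).toNat = l.length + 1 := by omega
        simp [h, hlen]
      · rw [if_neg h,
          PySem.List.slice_from _ (by omega)]
        rw [PySem.List.slice_from _ (by omega)] at ih
        have hle : (pvLastDigit l + 1).toNat ≤ l.length := by omega
        rw [List.drop_append_of_le_length hle, ih]
        rw [show (l ++ [b]).reverse = b :: l.reverse from by simp,
          List.takeWhile_cons,
          if_pos (show (!decide (48 ≤ b ∧ b ≤ 57)) = true from by simp [h])]
        simp

-- unfolding facts for A's recursive decoder, one per branch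
theorem pvIg_ascii (b : Int) (l : List Int) (h : b < 0x80) :
    pvUtf8Ignore (b :: l) = Char.ofNat b.toNat :: pvUtf8Ignore l := by
  rw [pvUtf8Ignore.eq_def]; dsimp only; rw [if_pos h]

theorem pvIg_skip (b : Int) (l : List Int) (h1 : ¬ b < 0x80)
    (h2 : ¬ (0xC2 ≤ b ∧ b ≤ 0xDF)) (h3 : ¬ (0xE0 ≤ b ∧ b ≤ 0xEF))
    (h4 : ¬ (0xF0 ≤ b ∧ b ≤ 0xF4)) : pvUtf8Ignore (b :: l) = pvUtf8Ignore l := by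
  rw [pvUtf8Ignore.eq_def]; dsimp only
  rw [if_neg h1, if_neg h2, if_neg h3, if_neg h4]

theorem pvIg_d1 (b0 : Int) (h0 : 0xC2 ≤ b0 ∧ b0 ≤ 0xDF) : pvUtf8Ignore [b0] = [] := by
  rw [pvUtf8Ignore.eq_def]; dsimp only
  rw [if_neg (by omega), if_pos h0]

theorem pvIg_d2 (b0 b : Int) (l : List Int) (h0 : 0xC2 ≤ b0 ∧ b0 ≤ 0xDF)
    (hc : 0x80 ≤ b ∧ b ≤ 0xBF) :
    pvUtf8Ignore (b0 :: b :: l) =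
      Char.ofNat ((b0 - 0xC0) * 64 + (b - 0x80)).toNat :: pvUtf8Ignore l := by
  rw [pvUtf8Ignore.eq_def]; dsimp only
  rw [if_neg (by omega), if_pos h0]; rw [if_pos hc]

theorem pvIg_d3 (b0 b : Int) (l : List Int) (h0 : 0xC2 ≤ b0 ∧ b0 ≤ 0xDF)
    (hc : ¬ (0x80 ≤ b ∧ b ≤ 0xBF)) :
    pvUtf8Ignore (b0 :: b :: l) = pvUtf8Ignore (b :: l) := by
  rw [pvUtf8Ignore.eq_def]; dsimp only
  rw [if_neg (by omega), if_pos h0]; rw [if_neg hc]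

theorem pvIg_t1 (b0 : Int) (h0 : 0xE0 ≤ b0 ∧ b0 ≤ 0xEF) : pvUtf8Ignore [b0] = [] := by
  rw [pvUtf8Ignore.eq_def]; dsimp only
  rw [if_neg (by omega), if_neg (by omega), if_pos h0]

theorem pvIg_t2 (b0 b1 : Int) (h0 : 0xE0 ≤ b0 ∧ b0 ≤ 0xEF)
    (h1 : (if b0 = 0xE0 then (0xA0:Int) else 0x80) ≤ b1 ∧
      b1 ≤ (if b0 = 0xED then (0x9F:Int) else 0xBF)) : pvUtf8Ignore [b0, b1] = [] := by
  rw [pvUtf8Ignore.eq_def]; dsimp only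
  rw [if_neg (by omega), if_neg (by omega), if_pos h0]; rw [if_pos h1]

theorem pvIg_t3 (b0 b : Int) (l : List Int) (h0 : 0xE0 ≤ b0 ∧ b0 ≤ 0xEF)
    (hc : ¬ ((if b0 = 0xE0 then (0xA0:Int) else 0x80) ≤ b ∧
      b ≤ (if b0 = 0xED then (0x9F:Int) else 0xBF))) :
    pvUtf8Ignore (b0 :: b :: l) = pvUtf8Ignore (b :: l) := by
  rw [pvUtf8Ignore.eq_def]; dsimp only
  rw [if_neg (by omega), if_neg (by omega), if_pos h0]; rw [if_neg hc]

theorem pvIg_t4 (b0 b1 b : Int) (l : List Int) (h0 : 0xE0 ≤ b0 ∧ b0 ≤ 0xEF)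
    (h1 : (if b0 = 0xE0 then (0xA0:Int) else 0x80) ≤ b1 ∧
      b1 ≤ (if b0 = 0xED then (0x9F:Int) else 0xBF)) (hc : 0x80 ≤ b ∧ b ≤ 0xBF) :
    pvUtf8Ignore (b0 :: b1 :: b :: l) =
      Char.ofNat ((b0 - 0xE0) * 4096 + (b1 - 0x80) * 64 + (b - 0x80)).toNat ::
        pvUtf8Ignore l := by
  rw [pvUtf8Ignore.eq_def]; dsimp only
  rw [if_neg (by omega), if_neg (by omega), if_pos h0]
  rw [if_pos h1]; rw [if_pos hc]

theorem pvIg_t5 (b0 b1 b : Int) (l : List Int) (h0 : 0xE0 ≤ b0 ∧ b0 ≤ 0xEF)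
    (h1 : (if b0 = 0xE0 then (0xA0:Int) else 0x80) ≤ b1 ∧
      b1 ≤ (if b0 = 0xED then (0x9F:Int) else 0xBF)) (hc : ¬ (0x80 ≤ b ∧ b ≤ 0xBF)) :
    pvUtf8Ignore (b0 :: b1 :: b :: l) = pvUtf8Ignore (b :: l) := by
  rw [pvUtf8Ignore.eq_def]; dsimp only
  rw [if_neg (by omega), if_neg (by omega), if_pos h0]
  rw [if_pos h1]; rw [if_neg hc]

theorem pvIg_q1 (b0 : Int) (h0 : 0xF0 ≤ b0 ∧ b0 ≤ 0xF4) : pvUtf8Ignore [b0] = [] := by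
  rw [pvUtf8Ignore.eq_def]; dsimp only
  rw [if_neg (by omega), if_neg (by omega), if_neg (by omega), if_pos h0]

theorem pvIg_q2 (b0 b1 : Int) (h0 : 0xF0 ≤ b0 ∧ b0 ≤ 0xF4)
    (h1 : (if b0 = 0xF0 then (0x90:Int) else 0x80) ≤ b1 ∧
      b1 ≤ (if b0 = 0xF4 then (0x8F:Int) else 0xBF)) : pvUtf8Ignore [b0, b1] = [] := by
  rw [pvUtf8Ignore.eq_def]; dsimp only
  rw [if_neg (by omega), if_neg (by omega), if_neg (by omega), if_pos h0]
  rw [if_pos h1]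

theorem pvIg_q3 (b0 b1 b2 : Int) (h0 : 0xF0 ≤ b0 ∧ b0 ≤ 0xF4)
    (h1 : (if b0 = 0xF0 then (0x90:Int) else 0x80) ≤ b1 ∧
      b1 ≤ (if b0 = 0xF4 then (0x8F:Int) else 0xBF)) (h2 : 0x80 ≤ b2 ∧ b2 ≤ 0xBF) :
    pvUtf8Ignore [b0, b1, b2] = [] := by
  rw [pvUtf8Ignore.eq_def]; dsimp only
  rw [if_neg (by omega), if_neg (by omega), if_neg (by omega), if_pos h0]
  rw [if_pos h1]; rw [if_pos h2]

theorem pvIg_q4 (b0 b : Int) (l : List Int) (h0 : 0xF0 ≤ b0 ∧ b0 ≤ 0xF4)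
    (hc : ¬ ((if b0 = 0xF0 then (0x90:Int) else 0x80) ≤ b ∧
      b ≤ (if b0 = 0xF4 then (0x8F:Int) else 0xBF))) :
    pvUtf8Ignore (b0 :: b :: l) = pvUtf8Ignore (b :: l) := by
  rw [pvUtf8Ignore.eq_def]; dsimp only
  rw [if_neg (by omega), if_neg (by omega), if_neg (by omega), if_pos h0]
  rw [if_neg hc]

theorem pvIg_q5 (b0 b1 b : Int) (l : List Int) (h0 : 0xF0 ≤ b0 ∧ b0 ≤ 0xF4)
    (h1 : (if b0 = 0xF0 then (0x90:Int) else 0x80) ≤ b1 ∧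
      b1 ≤ (if b0 = 0xF4 then (0x8F:Int) else 0xBF)) (hc : ¬ (0x80 ≤ b ∧ b ≤ 0xBF)) :
    pvUtf8Ignore (b0 :: b1 :: b :: l) = pvUtf8Ignore (b :: l) := by
  rw [pvUtf8Ignore.eq_def]; dsimp only
  rw [if_neg (by omega), if_neg (by omega), if_neg (by omega), if_pos h0]
  rw [if_pos h1]; rw [if_neg hc]

theorem pvIg_q6 (b0 b1 b2 b : Int) (l : List Int) (h0 : 0xF0 ≤ b0 ∧ b0 ≤ 0xF4)
    (h1 : (if b0 = 0xF0 then (0x90:Int) else 0x80) ≤ b1 ∧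
      b1 ≤ (if b0 = 0xF4 then (0x8F:Int) else 0xBF)) (h2 : 0x80 ≤ b2 ∧ b2 ≤ 0xBF)
    (hc : 0x80 ≤ b ∧ b ≤ 0xBF) :
    pvUtf8Ignore (b0 :: b1 :: b2 :: b :: l) =
      Char.ofNat ((b0 - 0xF0) * 262144 + (b1 - 0x80) * 4096 +
        (b2 - 0x80) * 64 + (b - 0x80)).toNat :: pvUtf8Ignore l := by
  rw [pvUtf8Ignore.eq_def]; dsimp only
  rw [if_neg (by omega), if_neg (by omega), if_neg (by omega), if_pos h0]
  rw [if_pos h1]; rw [if_pos h2]; rw [if_pos hc]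

theorem pvIg_q7 (b0 b1 b2 b : Int) (l : List Int) (h0 : 0xF0 ≤ b0 ∧ b0 ≤ 0xF4)
    (h1 : (if b0 = 0xF0 then (0x90:Int) else 0x80) ≤ b1 ∧
      b1 ≤ (if b0 = 0xF4 then (0x8F:Int) else 0xBF)) (h2 : 0x80 ≤ b2 ∧ b2 ≤ 0xBF)
    (hc : ¬ (0x80 ≤ b ∧ b ≤ 0xBF)) :
    pvUtf8Ignore (b0 :: b1 :: b2 :: b :: l) = pvUtf8Ignore (b :: l) := by
  rw [pvUtf8Ignore.eq_def]; dsimp only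
  rw [if_neg (by omega), if_neg (by omega), if_neg (by omega), if_pos h0]
  rw [if_pos h1]; rw [if_pos h2]; rw [if_neg hc]

-- valid incomplete-multibyte states of B's fold
def pvPendOK : List Int → Prop
  | [] => True
  | [b0] => (0xC2 ≤ b0 ∧ b0 ≤ 0xDF) ∨ (0xE0 ≤ b0 ∧ b0 ≤ 0xEF) ∨ (0xF0 ≤ b0 ∧ b0 ≤ 0xF4)
  | [b0, b1] =>
      ((0xE0 ≤ b0 ∧ b0 ≤ 0xEF) ∧
        (if b0 = 0xE0 then (0xA0:Int) else 0x80) ≤ b1 ∧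
        b1 ≤ (if b0 = 0xED then (0x9F:Int) else 0xBF)) ∨
      ((0xF0 ≤ b0 ∧ b0 ≤ 0xF4) ∧
        (if b0 = 0xF0 then (0x90:Int) else 0x80) ≤ b1 ∧
        b1 ≤ (if b0 = 0xF4 then (0x8F:Int) else 0xBF))
  | [b0, b1, b2] =>
      (0xF0 ≤ b0 ∧ b0 ≤ 0xF4) ∧
      ((if b0 = 0xF0 then (0x90:Int) else 0x80) ≤ b1 ∧
        b1 ≤ (if b0 = 0xF4 then (0x8F:Int) else 0xBF)) ∧
      (0x80 ≤ b2 ∧ b2 ≤ 0xBF)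
  | _ => False

theorem pvUtf8Start_pend (acc : List Char) (b : Int) :
    pvPendOK (pvUtf8Start acc b).2 := by
  unfold pvUtf8Start
  split_ifs with h1 h2
  · trivial
  · exact h2
  · trivial

theorem pvUtf8Start_spec (acc : List Char) (b : Int) (l : List Int) :
    (pvUtf8Start acc b).1 ++ pvUtf8Ignore ((pvUtf8Start acc b).2 ++ l) =
      acc ++ pvUtf8Ignore (b :: l) := by
  unfold pvUtf8Start
  split_ifs with h1 h2
  · rw [pvIg_ascii b l h1]; simp
  · simp
  · simp only [List.nil_append]
    rw [pvIg_skip b l h1 (by tauto) (by tauto) (by tauto)]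

theorem pvUtf8Fold_eq (l : List Int) :
    ∀ (acc : List Char) (pending : List Int), pvPendOK pending →
      (l.foldl pvUtf8Step (acc, pending)).1 = acc ++ pvUtf8Ignore (pending ++ l) := by
  induction l with
  | nil =>
      intro acc pending hp
      simp only [List.foldl_nil, List.append_nil]
      match pending, hp with
      | [], _ => simp [pvUtf8Ignore]
      | [b0], hp =>
          rcases hp with h | h | h
          · rw [pvIg_d1 b0 h]; simp
          · rw [pvIg_t1 b0 h]; simp
          · rw [pvIg_q1 b0 h]; simp
      | [b0, b1], hp =>
          rcases hp with ⟨h0, h1⟩ | ⟨h0, h1⟩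
          · rw [pvIg_t2 b0 b1 h0 h1]; simp
          · rw [pvIg_q2 b0 b1 h0 h1]; simp
      | [b0, b1, b2], hp =>
          obtain ⟨h0, h1, h2⟩ := hp
          rw [pvIg_q3 b0 b1 b2 h0 h1 h2]; simp
  | cons b l ih =>
      intro acc pending hp
      simp only [List.foldl_cons]
      match pending, hp with
      | [], _ =>
          simp only [pvUtf8Step, List.nil_append]
          rw [ih _ _ (pvUtf8Start_pend acc b)]
          exact pvUtf8Start_spec acc b l
      | [b0], hp =>
          simp only [pvUtf8Step]
          rcases hp with h | h | h
          · rw [if_pos h]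
            by_cases hc : 0x80 ≤ b ∧ b ≤ 0xBF
            · rw [if_pos hc, ih _ [] (by trivial)]
              simp only [List.cons_append, List.nil_append]
              rw [pvIg_d2 b0 b l h hc]; simp
            · rw [if_neg hc, ih _ _ (pvUtf8Start_pend acc b), pvUtf8Start_spec]
              simp only [List.cons_append, List.nil_append]
              rw [pvIg_d3 b0 b l h hc]
          · rw [if_neg (by omega), if_pos h]
            by_cases hc : (if b0 = 0xE0 then (0xA0:Int) else 0x80) ≤ b ∧
                b ≤ (if b0 = 0xED then (0x9F:Int) else 0xBF)
            · rw [if_pos hc, ih _ [b0, b] (Or.inl ⟨h, hc⟩)]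
              simp
            · rw [if_neg hc, ih _ _ (pvUtf8Start_pend acc b), pvUtf8Start_spec]
              simp only [List.cons_append, List.nil_append]
              rw [pvIg_t3 b0 b l h hc]
          · rw [if_neg (by omega), if_neg (by omega)]
            by_cases hc : (if b0 = 0xF0 then (0x90:Int) else 0x80) ≤ b ∧
                b ≤ (if b0 = 0xF4 then (0x8F:Int) else 0xBF)
            · rw [if_pos hc, ih _ [b0, b] (Or.inr ⟨h, hc⟩)]
              simp
            · rw [if_neg hc, ih _ _ (pvUtf8Start_pend acc b), pvUtf8Start_spec]
              simp only [List.cons_append, List.nil_append]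
              rw [pvIg_q4 b0 b l h hc]
      | [b0, b1], hp =>
          simp only [pvUtf8Step]
          rcases hp with ⟨h0, h1⟩ | ⟨h0, h1⟩
          · rw [if_pos h0]
            by_cases hc : 0x80 ≤ b ∧ b ≤ 0xBF
            · rw [if_pos hc, ih _ [] (by trivial)]
              simp only [List.cons_append, List.nil_append]
              rw [pvIg_t4 b0 b1 b l h0 h1 hc]; simp
            · rw [if_neg hc, ih _ _ (pvUtf8Start_pend acc b), pvUtf8Start_spec]
              simp only [List.cons_append, List.nil_append]
              rw [pvIg_t5 b0 b1 b l h0 h1 hc]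
          · rw [if_neg (by omega)]
            by_cases hc : 0x80 ≤ b ∧ b ≤ 0xBF
            · rw [if_pos hc, ih _ [b0, b1, b] ⟨h0, h1, hc⟩]
              simp
            · rw [if_neg hc, ih _ _ (pvUtf8Start_pend acc b), pvUtf8Start_spec]
              simp only [List.cons_append, List.nil_append]
              rw [pvIg_q5 b0 b1 b l h0 h1 hc]
      | [b0, b1, b2], hp =>
          obtain ⟨h0, h1, h2⟩ := hp
          simp only [pvUtf8Step]
          by_cases hc : 0x80 ≤ b ∧ b ≤ 0xBF
          · rw [if_pos hc, ih _ [] (by trivial)]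
            simp only [List.cons_append, List.nil_append]
            rw [pvIg_q6 b0 b1 b2 b l h0 h1 h2 hc]; simp
          · rw [if_neg hc, ih _ _ (pvUtf8Start_pend acc b), pvUtf8Start_spec]
            simp only [List.cons_append, List.nil_append]
            rw [pvIg_q7 b0 b1 b2 b l h0 h1 h2 hc]

theorem pvUtf8Decode_eq (l : List Int) : pvUtf8Decode l = pvUtf8Ignore l := by
  unfold pvUtf8Decode
  rw [pvUtf8Fold_eq l [] [] trivial]
  simp

-- ===== VERDICT (by name: the statement is the Claim_ definition above) =====
theorem extract_chars_until_number_spec : Claim_equal_extract_chars_until_number := by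
  intro byte_obj _ _
  unfold Spec_extract_chars_until_number extract_chars_until_number
    extract_chars_until_number_alt
  rw [pvLoopA_eq, slice_eq_takeWhile, pvUtf8Decode_eq]
  simp
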